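-- pv_equiv track=rewrite | github.com/ekahn27/MyWork | googleChallenge/challenge2-2.py | solution
-- ===== SOURCE A (Python) =====
-- def solution(x, y):
--     ID= 0
-- #get initial value along x-axis
--     for i in range(1, x+1):
--        ID += i
-- #now go up y-axis to get final value
--     currStep= x
--     for i in range(1,y):
--        ID += currStep
--        currStep += 1
--     return str(ID)
-- ===== SOURCE B (Python) =====
-- def solution(x, y):
--     # closed-form arithmetic: triangular base along x plus arithmetic series up y
--     base = x * (x + 1) // 2 if x > 0 else 0
--     climb = (y - 1) * x + (y - 2) * (y - 1) // 2 if y > 1 else 0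
--     return str(base + climb)
-- ===== Notes on version B (the rewrite author's own statement) =====
-- stated objective: faster
-- what changed: Replaced the two accumulation loops (sum 1..x, then y-1 increments up the diagonal) with a closed-form Gauss formula computed in O(1).
import Mathlib
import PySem

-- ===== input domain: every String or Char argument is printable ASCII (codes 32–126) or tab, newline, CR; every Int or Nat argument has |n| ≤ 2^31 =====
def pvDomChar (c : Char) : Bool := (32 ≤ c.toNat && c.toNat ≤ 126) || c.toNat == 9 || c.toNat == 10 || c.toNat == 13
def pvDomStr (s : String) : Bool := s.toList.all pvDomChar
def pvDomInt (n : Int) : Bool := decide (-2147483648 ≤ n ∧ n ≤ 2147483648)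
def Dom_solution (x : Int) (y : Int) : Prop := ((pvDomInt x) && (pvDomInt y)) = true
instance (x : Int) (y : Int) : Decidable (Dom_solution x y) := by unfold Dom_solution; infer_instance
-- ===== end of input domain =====

-- B replaces A's two accumulation loops by a closed-form Gauss formula (O(1) instead of O(x+y)).

-- ===== PORT A =====
def solution (x : Int) (y : Int) : String :=
  -- ID = 0; for i in range(1, x+1): ID += i
  let ID : Int := (PySem.List.pyRange 1 (x + 1) 1).foldl (fun acc i => acc + i) 0
  -- currStep = x; for i in range(1, y): ID += currStep; currStep += 1
  let st : Int × Int :=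
    (PySem.List.pyRange 1 y 1).foldl (fun (s : Int × Int) _ => (s.1 + s.2, s.2 + 1)) (ID, x)
  PySem.Int.toStr st.1

-- ===== PORT B =====
def solution_alt (x : Int) (y : Int) : String :=
  let base : Int := if 0 < x then PySem.Int.floordiv (x * (x + 1)) 2 else 0
  let climb : Int := if 1 < y then (y - 1) * x + PySem.Int.floordiv ((y - 2) * (y - 1)) 2 else 0
  PySem.Int.toStr (base + climb)

-- ===== PRECONDITION & SPEC =====
def Spec_solution (x : Int) (y : Int) (out : String) : Prop := out = solution_alt x y
instance (x : Int) (y : Int) (out : String) : Decidable (Spec_solution x y out) := by unfold Spec_solution; infer_instance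

-- ===== CLAIM (what is proved, stated in full; the proofs are below) =====
def Claim_equal_solution : Prop := ∀ (x : Int) (y : Int), Dom_solution x y → Spec_solution x y (solution x y)

-- ===== LEMMAS AND PROOFS =====

-- first loop: sum of 1..n (stated without division, via 2·)
lemma loop1_nat (n : Nat) :
    2 * ((PySem.List.pyRange 1 ((n : Int) + 1) 1).foldl (fun acc i => acc + i) 0) =
      (n : Int) * ((n : Int) + 1) := by
  induction n with
  | zero =>
    have h0 : ((0 : Nat) : Int) + 1 = 1 := by norm_num
    rw [h0, show PySem.List.pyRange 1 1 1 = [] from PySem.List.pyRange_one_eq_nil (by norm_num)]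
    simp
  | succ k ih =>
    have h : PySem.List.pyRange 1 ((k : Int) + 1 + 1) 1 =
        PySem.List.pyRange 1 ((k : Int) + 1) 1 ++ [(k : Int) + 1] :=
      PySem.List.pyRange_one_succ_right (a := 1) (b := (k : Int) + 1) (by omega)
    push_cast
    rw [h, List.foldl_append]
    simp only [List.foldl_cons, List.foldl_nil]
    ring_nf
    ring_nf at ih
    omega

-- second loop: the body ignores the element, so it is an arithmetic-series iteration
lemma loop2_gen (l : List Int) : ∀ p : Int × Int,
    2 * (l.foldl (fun (s : Int × Int) _ => (s.1 + s.2, s.2 + 1)) p).1 =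
      2 * p.1 + 2 * (l.length : Int) * p.2 + (l.length : Int) * ((l.length : Int) - 1) := by
  induction l with
  | nil => intro p; simp
  | cons a t ih =>
    intro p
    simp only [List.foldl_cons, List.length_cons]
    rw [ih]
    push_cast
    ring

theorem solution_spec : Claim_equal_solution := by
  unfold Claim_equal_solution
  intro x y _
  unfold Spec_solution solution solution_alt
  simp only []
  -- characterise loop 1
  have h1 : 2 * ((PySem.List.pyRange 1 (x + 1) 1).foldl (fun acc i => acc + i) 0) =
      (if 0 < x then x * (x + 1) else 0) := by
    by_cases hx : 0 < x
    · have hxn : x = ((x.toNat : Nat) : Int) := by omega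
      rw [if_pos hx, hxn]
      exact loop1_nat x.toNat
    · rw [if_neg hx, PySem.List.pyRange_one_eq_nil (by omega)]
      simp
  -- characterise loop 2
  set ID := (PySem.List.pyRange 1 (x + 1) 1).foldl (fun acc i => acc + i) 0 with hID
  have h2 := loop2_gen (PySem.List.pyRange 1 y 1) (ID, x)
  rw [PySem.List.length_pyRange_one] at h2
  -- rewrite floordiv as ediv
  rw [PySem.Int.floordiv_eq_ediv_of_pos (by omega), PySem.Int.floordiv_eq_ediv_of_pos (by omega)]
  congr 1
  -- now a pure Int arithmetic goal
  have e1 : 2 ∣ x * (x + 1) := (Int.even_mul_succ_self x).two_dvd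
  have e2 : 2 ∣ (y - 2) * (y - 1) := by
    have := (Int.even_mul_succ_self (y - 2)).two_dvd
    have h : (y - 2) * (y - 2 + 1) = (y - 2) * (y - 1) := by ring
    rwa [h] at this
  by_cases hy : 1 < y
  · have hn : (((y - 1).toNat : Nat) : Int) = y - 1 := by omega
    rw [hn] at h2
    rw [if_pos hy]
    by_cases hx : 0 < x
    · rw [if_pos hx] at h1; rw [if_pos hx]
      have hgoal : 2 * ((PySem.List.pyRange 1 y 1).foldl
          (fun (s : Int × Int) _ => (s.1 + s.2, s.2 + 1)) (ID, x)).1 =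
          x * (x + 1) + 2 * ((y - 1) * x) + (y - 2) * (y - 1) := by
        rw [h2, h1]; ring
      omega
    · rw [if_neg hx] at h1; rw [if_neg hx]
      have hgoal : 2 * ((PySem.List.pyRange 1 y 1).foldl
          (fun (s : Int × Int) _ => (s.1 + s.2, s.2 + 1)) (ID, x)).1 =
          2 * ((y - 1) * x) + (y - 2) * (y - 1) := by
        rw [h2, h1]; ring
      omega
  · rw [if_neg hy, PySem.List.pyRange_one_eq_nil (show y ≤ 1 by omega)]
    simp only [List.foldl_nil]
    by_cases hx : 0 < x
    · rw [if_pos hx] at h1; rw [if_pos hx]; omega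
    · rw [if_neg hx] at h1; rw [if_neg hx]; omega
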